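-- pv_equiv track=rewrite | github.com/sungguenja/other_Algorithmus_problem | programmers_방금그곡.py | isSong
-- ===== SOURCE A (Python) =====
-- def isSong(mine,scale):
--     i = 0
--     mine_string = ''.join(mine)
--     while i < len(scale):
--         if mine[0] != scale[i]:
--             i += 1
--         else:
--             if mine_string == ''.join(scale[i:i+len(mine)]):
--                 return True
--             i += 1
--     return False
-- ===== SOURCE B (Python) =====
-- def isSong(mine, scale):
--     target = ''.join(mine)
--     joined = ''.join(scale)
--     t = len(target)
--     k = len(mine)
--     n = len(scale)
--     lengths = [len(s) for s in scale]
--     # character offsets of element boundaries where a window of k elements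
--     # starts with the right first element and spans exactly t characters
--     valid = set()
--     off = 0
--     win = sum(lengths[:k])
--     for i in range(n):
--         if scale[i] == mine[0] and win == t:
--             valid.add(off)
--         off += lengths[i]
--         win -= lengths[i]
--         if i + k < n:
--             win += lengths[i + k]
--     # chase the occurrences of target inside joined; accept one on a valid boundary
--     p = joined.find(target)
--     while p != -1:
--         if p in valid:
--             return True
--         p = joined.find(target, p + 1)
--     return False
-- ===== Notes on version B (the rewrite author's own statement) =====
-- stated objective: faster
-- what changed: A scans list start positions and re-joins every k-element window for comparison; B instead joins once, builds in one sliding-window pass the set of boundary offsets whose window has the right first element and total length, then chases the character-level occurrences of the joined pattern via str.find and accepts one landing on such an offset.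
-- outside the precondition, e.g. on isSong([], ['a']): A raises IndexError, B raises IndexError
import Mathlib
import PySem

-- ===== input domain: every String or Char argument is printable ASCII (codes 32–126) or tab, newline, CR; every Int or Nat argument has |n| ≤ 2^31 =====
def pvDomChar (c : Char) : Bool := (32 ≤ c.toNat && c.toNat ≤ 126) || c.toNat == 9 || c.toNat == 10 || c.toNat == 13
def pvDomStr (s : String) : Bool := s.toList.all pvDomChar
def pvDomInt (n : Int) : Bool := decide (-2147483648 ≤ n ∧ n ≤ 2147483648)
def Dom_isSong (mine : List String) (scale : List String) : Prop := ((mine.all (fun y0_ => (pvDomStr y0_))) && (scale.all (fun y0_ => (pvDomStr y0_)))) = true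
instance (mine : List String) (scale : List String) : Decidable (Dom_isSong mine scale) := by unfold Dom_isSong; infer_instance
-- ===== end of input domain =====

-- B replaces A's window-join scan over start indices by one character-level substring search
-- (str.find chasing occurrences of the joined pattern) validated against a set of boundary
-- offsets built in a single sliding-window pass (objective: faster, constant factor).

-- ===== PORT A =====
-- the while loop of A, step for step: i is the loop counter
def isSongGo (mine : List String) (scale : List String) (mineString : String) (i : Nat) : Bool :=
  if i < scale.length then
    if PySem.List.pyGetD mine 0 "" ≠ PySem.List.pyGetD scale (i : Int) "" then
      isSongGo mine scale mineString (i + 1)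
    else
      if mineString = PySem.Str.join "" (PySem.List.slice scale (some (i : Int)) (some ((i : Int) + (mine.length : Int)))) then
        true
      else
        isSongGo mine scale mineString (i + 1)
  else
    false
termination_by scale.length - i

def isSong (mine : List String) (scale : List String) : Bool :=
  isSongGo mine scale (PySem.Str.join "" mine) 0

-- ===== PORT B =====
-- Source B's for-loop over range(n): state (valid, off, win); lengths = [len(s) for s in scale]
def pvCollect (scale : List String) (mine : List String) (lengths : List Int)
    (k n : Nat) (t : Int) (i : Nat) (off win : Int) (valid : PySem.Set Int) : PySem.Set Int :=
  if i < n then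
    pvCollect scale mine lengths k n t (i + 1)
      (off + PySem.List.pyGetD lengths (i : Int) 0)
      (win - PySem.List.pyGetD lengths (i : Int) 0
        + (if i + k < n then PySem.List.pyGetD lengths ((i : Int) + (k : Int)) 0 else 0))
      (if PySem.List.pyGetD scale (i : Int) "" = PySem.List.pyGetD mine 0 "" ∧ win = t then
        PySem.Set.add valid off
      else valid)
  else valid
termination_by n - i

-- a start index past len(s) makes Python's str.find return -1 (needed for the loop's termination)
theorem pvFindFrom_past (s sub : List Char) (st : Int) (h : (s.length : Int) < st) :
    PySem.Chars.findFrom s sub st none = -1 := by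
  unfold PySem.Chars.findFrom
  have h0 : ¬ st < 0 := by omega
  simp only [h0, if_false]
  rw [if_pos h]

-- any occurrence reported by findFrom lies at most at s.length
theorem pvFindFrom_le (s sub : List Char) (k : Nat) (hk : k ≤ s.length) :
    PySem.Chars.findFrom s sub (k : Int) none ≤ (s.length : Int) := by
  rw [PySem.Chars.findFrom_natCast s sub k hk]
  split_ifs with h
  · omega
  · have := PySem.Chars.find_le_length (s.drop k) sub
    have hd : ((s.drop k).length : Int) = (s.length : Int) - k := by
      rw [List.length_drop]; omega
    omega

-- Source B's while loop: chase occurrences of target in joined from position p (an occurrence)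
def pvFindLoop (joined target : String) (valid : PySem.Set Int) (p : Nat) : Bool :=
  if PySem.Set.contains valid (p : Int) then true
  else
    let nxt := PySem.Str.findFrom joined target ((p : Int) + 1)
    if h : nxt = -1 then false
    else pvFindLoop joined target valid nxt.toNat
termination_by joined.toList.length + 1 - p
decreasing_by
  have h' : PySem.Chars.findFrom joined.toList target.toList ((p : Int) + 1) none ≠ -1 := by
    simpa using h
  by_cases hp : p + 1 ≤ joined.toList.length
  · have hcast : ((p : Int) + 1) = ((p + 1 : Nat) : Int) := by push_cast; ring
    rw [hcast] at h'
    have hspec := (PySem.Chars.findFrom_natCast_spec joined.toList target.toList (p + 1) hp h').1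
    have hle := pvFindFrom_le joined.toList target.toList (p + 1) hp
    simp only [PySem.Str.findFrom_eq, hcast]
    omega
  · exfalso
    apply h'
    apply pvFindFrom_past
    omega

def isSong_alt (mine : List String) (scale : List String) : Bool :=
  let target := PySem.Str.join "" mine
  let joined := PySem.Str.join "" scale
  let t : Int := PySem.Str.len target
  let k := mine.length
  let n := scale.length
  let lengths := scale.map (fun s => PySem.Str.len s)
  let valid := pvCollect scale mine lengths k n t 0 0 ((PySem.List.slice lengths none (some (k : Int))).sum) PySem.Set.empty
  let p := PySem.Str.find joined target
  if p = -1 then false else pvFindLoop joined target valid p.toNat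

-- ===== PRECONDITION & SPEC =====
-- Pre_ excludes only the inputs where A raises: mine = [] with scale ≠ [] makes mine[0] an IndexError (B raises there too).
def Pre_isSong (mine : List String) (scale : List String) : Prop := mine ≠ [] ∨ scale = []
instance (mine : List String) (scale : List String) : Decidable (Pre_isSong mine scale) := by unfold Pre_isSong; infer_instance

def pvWitness_isSong : List String × List String := (["C#", "D"], ["A", "C#", "D", "E"])

def Spec_isSong (mine : List String) (scale : List String) (out : Bool) : Prop := out = isSong_alt mine scale
instance (mine : List String) (scale : List String) (out : Bool) : Decidable (Spec_isSong mine scale out) := by unfold Spec_isSong; infer_instance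

-- ===== CLAIM (what is proved, stated in full; the proofs are below) =====
def Claim_equal_isSong : Prop := ∀ (mine : List String) (scale : List String), Dom_isSong mine scale → Pre_isSong mine scale → Spec_isSong mine scale (isSong mine scale)

-- ===== LEMMAS AND PROOFS =====

-- ''.join concatenates: Chars.join with empty separator is flatten
theorem pvJoin_nil_sep (parts : List (List Char)) : PySem.Chars.join [] parts = parts.flatten := by
  induction parts with
  | nil => simp [PySem.Chars.join_nil]
  | cons p rest ih =>
    cases rest with
    | nil => simp [PySem.Chars.join_singleton]
    | cons q r => simpa [PySem.Chars.join_cons_cons] using ih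

-- the flattened length of the first j elements (character offset of boundary j)
def pvOffN (L : List (List Char)) (j : Nat) : Nat := ((L.take j).flatten).length

-- the per-index condition of A (join of the k-element window equals the joined mine)
def pvQ (mine scale : List String) (j : Nat) : Prop :=
  PySem.List.pyGetD mine 0 "" = PySem.List.pyGetD scale (j : Int) "" ∧
  PySem.Str.join "" mine = PySem.Str.join "" (PySem.List.slice scale (some (j : Int)) (some ((j : Int) + (mine.length : Int))))

-- A's while loop searches for some j ≥ i with pvQ
theorem pvGo_iff (mine scale : List String) (i : Nat) :
    isSongGo mine scale (PySem.Str.join "" mine) i = true ↔ ∃ j, i ≤ j ∧ j < scale.length ∧ pvQ mine scale j := by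
  by_cases h : i < scale.length
  · rw [isSongGo, if_pos h]
    by_cases h1 : PySem.List.pyGetD mine 0 "" ≠ PySem.List.pyGetD scale (i : Int) ""
    · rw [if_pos h1, pvGo_iff mine scale (i + 1)]
      constructor
      · rintro ⟨j, hj1, hj2, hj3⟩; exact ⟨j, by omega, hj2, hj3⟩
      · rintro ⟨j, hj1, hj2, hj3⟩
        refine ⟨j, ?_, hj2, hj3⟩
        rcases Nat.eq_or_lt_of_le hj1 with rfl | h'
        · exact absurd hj3.1 h1
        · omega
    · rw [if_neg h1]
      have h1' : PySem.List.pyGetD mine 0 "" = PySem.List.pyGetD scale (i : Int) "" := not_ne_iff.mp h1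
      by_cases h2 : PySem.Str.join "" mine = PySem.Str.join "" (PySem.List.slice scale (some (i : Int)) (some ((i : Int) + (mine.length : Int))))
      · rw [if_pos h2]
        simp only [true_iff]
        exact ⟨i, le_refl i, h, h1', h2⟩
      · rw [if_neg h2, pvGo_iff mine scale (i + 1)]
        constructor
        · rintro ⟨j, hj1, hj2, hj3⟩; exact ⟨j, by omega, hj2, hj3⟩
        · rintro ⟨j, hj1, hj2, hj3⟩
          refine ⟨j, ?_, hj2, hj3⟩
          rcases Nat.eq_or_lt_of_le hj1 with rfl | h'
          · exact absurd hj3.2 h2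
          · omega
  · rw [isSongGo, if_neg h]
    constructor
    · intro hfalse; exact absurd hfalse (by simp)
    · rintro ⟨j, hj1, hj2, _⟩; omega
termination_by scale.length - i

-- the window of k list elements starting at j, as characters
theorem pvWindow_decomp (L : List (List Char)) (j k : Nat) :
    L.flatten = (L.take j).flatten ++ ((L.drop j).take k).flatten ++ (L.drop (j + k)).flatten := by
  have hdd : (L.drop j).drop k = L.drop (j + k) := by
    rw [List.drop_drop]
  calc L.flatten = ((L.take j) ++ L.drop j).flatten := by rw [List.take_append_drop]
    _ = (L.take j).flatten ++ (L.drop j).flatten := List.flatten_append ..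
    _ = (L.take j).flatten ++ (((L.drop j).take k) ++ (L.drop j).drop k).flatten := by rw [List.take_append_drop]
    _ = _ := by rw [List.flatten_append, hdd, List.append_assoc]

-- the boundary offsets are monotone prefix lengths: off (min (j+k) n) = off j + window length
theorem pvWindow_len (L : List (List Char)) (j k : Nat) :
    pvOffN L (min (j + k) L.length) = pvOffN L j + (((L.drop j).take k).flatten).length := by
  unfold pvOffN
  have h1 : L.take (min (j + k) L.length) = L.take (j + k) := by
    apply List.take_eq_take_iff.mpr
    omega
  rw [h1, List.take_add, List.flatten_append, List.length_append]

-- string equality through toList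
theorem pvStr_eq_iff (s t : String) : s = t ↔ s.toList = t.toList := by
  constructor
  · intro h; rw [h]
  · intro h
    simpa using congrArg String.ofList h

theorem pvOffN_le (L : List (List Char)) (j : Nat) : pvOffN L j ≤ L.flatten.length := by
  unfold pvOffN
  conv_rhs => rw [← List.take_append_drop j L]
  rw [List.flatten_append, List.length_append]
  omega

theorem pvOffN_succ (L : List (List Char)) (i : Nat) (h : i < L.length) :
    pvOffN L (i + 1) = pvOffN L i + (L.getD i []).length := by
  unfold pvOffN
  rw [List.take_add_one, List.flatten_append, List.length_append]
  congr 1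
  rw [List.getElem?_eq_getElem h]
  simp [List.getD, List.getElem?_eq_getElem h]

-- the length list entry at a valid index
theorem pvLen_at (scale : List String) (i : Nat) (h : i < scale.length) :
    PySem.List.pyGetD (scale.map (fun s => PySem.Str.len s)) (i : Int) 0
      = (((scale.map String.toList).getD i []).length : Int) := by
  rw [PySem.List.pyGetD_natCast]
  simp [List.getD, List.getElem?_map, List.getElem?_eq_getElem h, PySem.Str.len_eq]

-- A's inner condition at index j, restated as: boundary alignment + window length + occurrence
theorem pvQ_iff (mine scale : List String) (j : Nat) (hj : j < scale.length) :
    pvQ mine scale j ↔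
      (PySem.List.pyGetD mine 0 "" = PySem.List.pyGetD scale (j : Int) "") ∧
      ((pvOffN (scale.map String.toList) (min (j + mine.length) scale.length) : Int)
          - (pvOffN (scale.map String.toList) j : Int) = (((mine.map String.toList).flatten).length : Int)) ∧
      (mine.map String.toList).flatten <+: ((scale.map String.toList).flatten).drop (pvOffN (scale.map String.toList) j) := by
  have hsep : ("" : String).toList = [] := rfl
  set L := scale.map String.toList with hL
  have hLlen : L.length = scale.length := by simp [hL]
  set T := (mine.map String.toList).flatten with hT
  set W := ((L.drop j).take mine.length).flatten with hW
  have htjoin : (PySem.Str.join "" mine).toList = T := by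
    rw [PySem.Str.toList_join, hsep, pvJoin_nil_sep]
  have hwin : (PySem.Str.join "" (PySem.List.slice scale (some ((j : Int))) (some ((j : Int) + (mine.length : Int))))).toList = W := by
    rw [PySem.List.slice_natCast_add, PySem.Str.toList_join, hsep, pvJoin_nil_sep]
    simp [hW, hL, List.map_take, List.map_drop]
  have hlenW : pvOffN L (min (j + mine.length) L.length) = pvOffN L j + W.length :=
    pvWindow_len L j mine.length
  have hdrop : L.flatten.drop (pvOffN L j) = W ++ (L.drop (j + mine.length)).flatten := by
    conv_lhs => rw [pvWindow_decomp L j mine.length, List.append_assoc]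
    rw [show pvOffN L j = ((L.take j).flatten).length from rfl, List.drop_left]
  unfold pvQ
  rw [hLlen] at hlenW
  constructor
  · rintro ⟨h1, h2⟩
    have h2' := congrArg String.toList h2
    rw [htjoin, hwin] at h2'
    refine ⟨h1, ?_, ?_⟩
    · rw [hlenW, h2']; push_cast; ring
    · rw [hdrop, ← h2']
      exact List.prefix_append T _
  · rintro ⟨h1, h2, h3⟩
    have hWT : W = T := by
      have hlen : W.length = T.length := by
        rw [hlenW] at h2; push_cast at h2; omega
      rw [hdrop] at h3
      obtain ⟨r, hr⟩ := h3
      exact ((List.append_inj hr hlen.symm).1).symm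
    refine ⟨h1, ?_⟩
    rw [pvStr_eq_iff, htjoin, hwin]
    exact hWT.symm

-- the sliding-window pass collects exactly the aligned offsets with the right first element and span
theorem pvCollect_mem (mine scale : List String) (t : Int) (q : Int) (i : Nat)
    (off win : Int) (valid : PySem.Set Int)
    (hoff : off = (pvOffN (scale.map String.toList) i : Int))
    (hwin : win = (pvOffN (scale.map String.toList) (min (i + mine.length) scale.length) : Int)
        - (pvOffN (scale.map String.toList) i : Int)) :
    q ∈ pvCollect scale mine (scale.map (fun s => PySem.Str.len s)) mine.length scale.length t i off win valid ↔
      q ∈ valid ∨ ∃ j, i ≤ j ∧ j < scale.length ∧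
        (PySem.List.pyGetD scale (j : Int) "" = PySem.List.pyGetD mine 0 "" ∧
          (pvOffN (scale.map String.toList) (min (j + mine.length) scale.length) : Int)
            - (pvOffN (scale.map String.toList) j : Int) = t) ∧
        q = (pvOffN (scale.map String.toList) j : Int) := by
  by_cases hi : i < scale.length
  · rw [pvCollect, if_pos hi]
    have hLi : i < (scale.map String.toList).length := by simpa using hi
    have hoff' : off + PySem.List.pyGetD (scale.map (fun s => PySem.Str.len s)) (i : Int) 0
        = (pvOffN (scale.map String.toList) (i + 1) : Int) := by
      rw [pvLen_at scale i hi, hoff, pvOffN_succ _ i hLi]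
      push_cast; ring
    have hwin' : win - PySem.List.pyGetD (scale.map (fun s => PySem.Str.len s)) (i : Int) 0
        + (if i + mine.length < scale.length then
            PySem.List.pyGetD (scale.map (fun s => PySem.Str.len s)) ((i : Int) + (mine.length : Int)) 0
          else 0)
        = (pvOffN (scale.map String.toList) (min ((i + 1) + mine.length) scale.length) : Int)
            - (pvOffN (scale.map String.toList) (i + 1) : Int) := by
      rw [pvLen_at scale i hi, hwin, pvOffN_succ _ i hLi]
      by_cases hk : i + mine.length < scale.length
      · have hk' : i + mine.length < (scale.map String.toList).length := by simpa using hk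
        have hcast : ((i : Int) + (mine.length : Int)) = ((i + mine.length : Nat) : Int) := by
          push_cast; ring
        rw [if_pos hk, hcast, pvLen_at scale (i + mine.length) hk]
        have h1 : min (i + mine.length) scale.length = i + mine.length := by omega
        have h2 : min ((i + 1) + mine.length) scale.length = (i + mine.length) + 1 := by omega
        rw [h1, h2, pvOffN_succ _ (i + mine.length) hk']
        push_cast; ring
      · rw [if_neg hk]
        have h1 : min (i + mine.length) scale.length = scale.length := by omega
        have h2 : min ((i + 1) + mine.length) scale.length = scale.length := by omega
        rw [h1, h2]
        push_cast; ring
    rw [hoff', hwin',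
      pvCollect_mem mine scale t q (i + 1) _ _ _ rfl rfl]
    by_cases hc : PySem.List.pyGetD scale (i : Int) "" = PySem.List.pyGetD mine 0 "" ∧ win = t
    · rw [if_pos hc]
      rw [show (PySem.Set.add valid off : List Int) = valid.add off from rfl]
      constructor
      · rintro (hv | ⟨j, hj1, hj2, hj3, hj4⟩)
        · rcases (PySem.Set.mem_add valid off q).mp hv with h | h
          · exact Or.inl h
          · exact Or.inr ⟨i, le_refl i, hi, ⟨hc.1, by rw [← hwin]; exact hc.2⟩, by rw [h, hoff]⟩
        · exact Or.inr ⟨j, by omega, hj2, hj3, hj4⟩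
      · rintro (hv | ⟨j, hj1, hj2, hj3, hj4⟩)
        · exact Or.inl ((PySem.Set.mem_add valid off q).mpr (Or.inl hv))
        · rcases Nat.eq_or_lt_of_le hj1 with rfl | hj1'
          · exact Or.inl ((PySem.Set.mem_add valid off q).mpr (Or.inr (by rw [hj4, hoff])))
          · exact Or.inr ⟨j, by omega, hj2, hj3, hj4⟩
    · rw [if_neg hc]
      constructor
      · rintro (hv | ⟨j, hj1, hj2, hj3, hj4⟩)
        · exact Or.inl hv
        · exact Or.inr ⟨j, by omega, hj2, hj3, hj4⟩
      · rintro (hv | ⟨j, hj1, hj2, hj3, hj4⟩)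
        · exact Or.inl hv
        · rcases Nat.eq_or_lt_of_le hj1 with rfl | hj1'
          · exact absurd ⟨hj3.1, by rw [hwin]; exact hj3.2⟩ hc
          · exact Or.inr ⟨j, by omega, hj2, hj3, hj4⟩
  · rw [pvCollect, if_neg (by omega : ¬ i < scale.length)]
    constructor
    · intro hv; exact Or.inl hv
    · rintro (hv | ⟨j, hj1, hj2, _, _⟩)
      · exact hv
      · omega
termination_by scale.length - i

theorem pvLenSum (l : List String) :
    (l.map (fun s => PySem.Str.len s)).sum = (((l.map String.toList).flatten).length : Int) := by
  induction l with
  | nil => simp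
  | cons s rest ih =>
    simp only [List.map_cons, List.sum_cons, PySem.Str.len_eq, List.flatten_cons,
      List.length_append] at ih ⊢
    rw [ih]
    push_cast
    ring

theorem pvInitWin (scale : List String) (k : Nat) :
    (PySem.List.slice (scale.map (fun s => PySem.Str.len s)) none (some (k : Int))).sum
      = (pvOffN (scale.map String.toList) (min k scale.length) : Int) := by
  rw [PySem.List.slice_to (hb := by positivity)]
  unfold pvOffN
  have h1 : (scale.map String.toList).take (min k scale.length) = (scale.take k).map String.toList := by
    rw [List.map_take, List.take_eq_take_iff]
    simp
  rw [h1, Int.toNat_natCast, ← List.map_take, pvLenSum]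

-- prefix of a dropped tail is an infix
theorem pvInfix_of_prefix_drop (T s : List Char) (q : Nat) (h : T <+: s.drop q) : T <:+: s :=
  List.infix_iff_prefix_suffix.mpr ⟨s.drop q, h, List.drop_suffix q s⟩

-- Source B's while loop, characterized: true iff some occurrence ≥ p lands on a collected offset
theorem pvFindLoop_iff (joined target : String) (valid : PySem.Set Int) (p : Nat)
    (hocc : target.toList <+: joined.toList.drop p)
    (hp : p ≤ joined.toList.length)
    (hbound : ∀ q : Int, q ∈ valid → 0 ≤ q ∧ q ≤ (joined.toList.length : Int)) :
    pvFindLoop joined target valid p = true ↔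
      ∃ q : Nat, p ≤ q ∧ target.toList <+: joined.toList.drop q ∧ ((q : Int) ∈ valid) := by
  rw [pvFindLoop]
  by_cases hmem : PySem.Set.contains valid (p : Int) = true
  · rw [if_pos hmem]
    have hm : ((p : Int) ∈ valid) := by simpa [PySem.Set.contains] using hmem
    exact iff_of_true rfl ⟨p, le_refl p, hocc, hm⟩
  · rw [if_neg hmem]
    have hnm : ¬ ((p : Int) ∈ valid) := by simpa [PySem.Set.contains] using hmem
    have hcast : ((p : Int) + 1) = ((p + 1 : Nat) : Int) := by push_cast; ring
    by_cases h1 : PySem.Str.findFrom joined target ((p : Int) + 1) = -1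
    · rw [dif_pos h1]
      refine iff_of_false (by simp) ?_
      rintro ⟨q, hpq, hq, hqv⟩
      rcases Nat.eq_or_lt_of_le hpq with rfl | hlt
      · exact hnm hqv
      · have hqle : (q : Int) ≤ (joined.toList.length : Int) := (hbound _ hqv).2
        have hqle' : q ≤ joined.toList.length := by exact_mod_cast hqle
        have hp1 : p + 1 ≤ joined.toList.length := by omega
        rw [PySem.Str.findFrom_eq, hcast] at h1
        have hno := (PySem.Chars.findFrom_natCast_eq_neg_one_iff joined.toList target.toList (p + 1) hp1).mp h1
        apply hno
        have hdd : joined.toList.drop q = (joined.toList.drop (p + 1)).drop (q - (p + 1)) := by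
          rw [List.drop_drop]; congr 1; omega
        rw [hdd] at hq
        exact pvInfix_of_prefix_drop _ _ _ hq
    · rw [dif_neg h1]
      have h1' : PySem.Chars.findFrom joined.toList target.toList ((p : Int) + 1) none ≠ -1 := by
        simpa using h1
      have hp1 : p + 1 ≤ joined.toList.length := by
        by_contra hgt
        exact h1' (pvFindFrom_past _ _ _ (by omega))
      rw [hcast] at h1'
      have hnxt' : PySem.Str.findFrom joined target ((p : Int) + 1)
          = PySem.Chars.findFrom joined.toList target.toList ((p + 1 : Nat) : Int) none := by
        rw [PySem.Str.findFrom_eq, hcast]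
      obtain ⟨hge, hoccn, hmin⟩ := PySem.Chars.findFrom_natCast_spec joined.toList target.toList (p + 1) hp1 h1'
      have hle := pvFindFrom_le joined.toList target.toList (p + 1) hp1
      rw [← hnxt'] at hge hoccn hmin hle
      have hgeN : p + 1 ≤ (PySem.Str.findFrom joined target ((p : Int) + 1)).toNat := by omega
      have hleN : (PySem.Str.findFrom joined target ((p : Int) + 1)).toNat ≤ joined.toList.length := by omega
      rw [pvFindLoop_iff joined target valid _ hoccn hleN hbound]
      constructor
      · rintro ⟨q, hq1, hq2, hq3⟩; exact ⟨q, by omega, hq2, hq3⟩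
      · rintro ⟨q, hq1, hq2, hq3⟩
        refine ⟨q, ?_, hq2, hq3⟩
        rcases Nat.eq_or_lt_of_le hq1 with rfl | hlt
        · exact absurd hq3 hnm
        · by_contra hqlt
          exact hmin q (by omega) (by omega) hq2
termination_by joined.toList.length + 1 - p
decreasing_by omega

-- ===== VERDICT (by name: the statement is the Claim_ definition above) =====
theorem isSong_spec : Claim_equal_isSong := by
  intro mine scale _ _
  unfold Spec_isSong isSong isSong_alt
  dsimp only
  rw [Bool.eq_iff_iff, pvGo_iff]
  set L := scale.map String.toList with hL
  set T := (mine.map String.toList).flatten with hT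
  have hsep : ("" : String).toList = [] := rfl
  have htjoin : (PySem.Str.join "" mine).toList = T := by
    rw [PySem.Str.toList_join, hsep, pvJoin_nil_sep]
  have hjjoin : (PySem.Str.join "" scale).toList = L.flatten := by
    rw [PySem.Str.toList_join, hsep, pvJoin_nil_sep]
  have ht : PySem.Str.len (PySem.Str.join "" mine) = (T.length : Int) := by
    rw [PySem.Str.len_eq, htjoin]
  -- the collected set, characterized
  have hvalid : ∀ q : Int,
      q ∈ pvCollect scale mine (scale.map (fun s => PySem.Str.len s)) mine.length scale.length
            (PySem.Str.len (PySem.Str.join "" mine)) 0 0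
            ((PySem.List.slice (scale.map (fun s => PySem.Str.len s)) none (some (mine.length : Int))).sum)
            PySem.Set.empty ↔
        ∃ j, j < scale.length ∧
          (PySem.List.pyGetD scale (j : Int) "" = PySem.List.pyGetD mine 0 "" ∧
            (pvOffN L (min (j + mine.length) scale.length) : Int) - (pvOffN L j : Int) = (T.length : Int)) ∧
          q = (pvOffN L j : Int) := by
    intro q
    rw [pvCollect_mem mine scale _ q 0 _ _ _ (by simp [pvOffN]) (by
      rw [pvInitWin]
      simp [pvOffN])]
    rw [ht]
    constructor
    · rintro (hv | ⟨j, _, hj, hc, hq⟩)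
      · exact absurd hv (by simp [PySem.Set.empty])
      · exact ⟨j, hj, hc, hq⟩
    · rintro ⟨j, hj, hc, hq⟩
      exact Or.inr ⟨j, Nat.zero_le j, hj, hc, hq⟩
  have hbound : ∀ q : Int,
      q ∈ pvCollect scale mine (scale.map (fun s => PySem.Str.len s)) mine.length scale.length
            (PySem.Str.len (PySem.Str.join "" mine)) 0 0
            ((PySem.List.slice (scale.map (fun s => PySem.Str.len s)) none (some (mine.length : Int))).sum)
            PySem.Set.empty →
        0 ≤ q ∧ q ≤ (((PySem.Str.join "" scale).toList).length : Int) := by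
    intro q hq
    obtain ⟨j, _, _, hq⟩ := (hvalid q).mp hq
    have := pvOffN_le L j
    rw [hjjoin]
    omega
  by_cases hfind : PySem.Str.find (PySem.Str.join "" scale) (PySem.Str.join "" mine) = -1
  · rw [if_pos hfind]
    refine iff_of_false ?_ (by simp)
    rintro ⟨j, _, hj, hQ⟩
    have hnof := (PySem.Str.find_eq_neg_one_iff _ _).mp hfind
    rw [htjoin, hjjoin] at hnof
    obtain ⟨_, _, hc3⟩ := (pvQ_iff mine scale j hj).mp hQ
    exact hnof (pvInfix_of_prefix_drop _ _ _ hc3)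
  · rw [if_neg hfind]
    -- facts about the first occurrence p0
    have hfc : PySem.Str.find (PySem.Str.join "" scale) (PySem.Str.join "" mine)
        = PySem.Chars.find L.flatten T := by
      rw [PySem.Str.find_eq, htjoin, hjjoin]
    have hge0 : 0 ≤ PySem.Chars.find L.flatten T := by
      have := PySem.Chars.neg_one_le_find L.flatten T
      rw [hfc] at hfind
      omega
    obtain ⟨hocc0, hmin0⟩ := PySem.Chars.find_spec hge0
    have hlef := PySem.Chars.find_le_length L.flatten T
    rw [pvFindLoop_iff _ _ _ _ (by rw [htjoin, hjjoin, hfc]; exact hocc0)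
      (by rw [hjjoin, hfc]; omega) hbound]
    constructor
    · rintro ⟨j, _, hj, hQ⟩
      obtain ⟨hc1, hc2, hc3⟩ := (pvQ_iff mine scale j hj).mp hQ
      refine ⟨pvOffN L j, ?_, ?_, ?_⟩
      · rw [hfc]
        by_contra hlt
        exact hmin0 (pvOffN L j) (by omega) hc3
      · rw [htjoin, hjjoin]
        exact hc3
      · exact (hvalid _).mpr ⟨j, hj, ⟨hc1.symm, hc2⟩, rfl⟩
    · rintro ⟨q, _, hq2, hq3⟩
      obtain ⟨j, hj, ⟨hc1, hc2⟩, hq⟩ := (hvalid _).mp hq3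
      have hqn : q = pvOffN L j := by exact_mod_cast hq
      refine ⟨j, Nat.zero_le j, hj, (pvQ_iff mine scale j hj).mpr ⟨hc1.symm, hc2, ?_⟩⟩
      rw [htjoin, hjjoin, hqn] at hq2
      exact hq2
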